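-- pv_equiv track=rewrite | github.com/levelheads/linear-a-decipherer | tools/commodity_validator.py | _build_line_index
-- ===== SOURCE A (Python) =====
-- from typing import Dict, List, Optional
--
-- def _build_line_index(words: List[str]) -> List[List[str]]:
--     """Split words into lines."""
--     lines = []
--     current = []
--     for w in words:
--         if w == "\n":
--             if current:
--                 lines.append(current)
--             current = []
--         else:
--             current.append(w)
--     if current:
--         lines.append(current)
--     return lines
-- ===== SOURCE B (Python) =====
-- from typing import Dict, List, Optional
--
-- def _build_line_index(words: List[str]) -> List[List[str]]:
--     """Split words into lines."""
--     lines = []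
--     i, n = 0, len(words)
--     while i < n:
--         if words[i] == "\n":
--             i += 1
--         else:
--             j = i
--             while j < n and words[j] != "\n":
--                 j += 1
--             lines.append(words[i:j])
--             i = j
--     return lines
-- ===== Notes on version B (the rewrite author's own statement) =====
-- stated objective: alternative
-- what changed: Replaces A's element-by-element accumulator loop (building up 'current' and flushing it on newlines and at the end) with a span scanner: skip newline tokens, then for each non-newline position find the end of the run and append the slice words[i:j] directly, so no pending-line accumulator or final flush exists.
import Mathlib
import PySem

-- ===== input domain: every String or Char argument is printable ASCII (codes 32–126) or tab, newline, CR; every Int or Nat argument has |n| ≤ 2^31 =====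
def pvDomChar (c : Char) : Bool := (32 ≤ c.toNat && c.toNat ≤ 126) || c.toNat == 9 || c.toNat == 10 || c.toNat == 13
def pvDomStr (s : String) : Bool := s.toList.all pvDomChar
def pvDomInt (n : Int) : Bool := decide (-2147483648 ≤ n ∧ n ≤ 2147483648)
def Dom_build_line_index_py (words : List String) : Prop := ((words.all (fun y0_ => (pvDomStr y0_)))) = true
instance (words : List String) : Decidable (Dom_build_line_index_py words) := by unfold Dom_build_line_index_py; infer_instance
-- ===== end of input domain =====

-- B replaces A's pending-line accumulator loop with a span scanner (skip newlines,
-- take each maximal non-newline run as a slice); same return value, no speed claim.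

-- ===== PORT A =====
-- A: one pass with accumulator `current`, flushed into `lines` on "\n" and at the end.
def build_line_index_py (words : List String) : List (List String) :=
  let st := words.foldl
    (fun (st : List (List String) × List String) w =>
      if w == "\n" then
        (if st.2.isEmpty then st.1 else st.1 ++ [st.2], [])
      else
        (st.1, st.2 ++ [w]))
    ([], [])
  if st.2.isEmpty then st.1 else st.1 ++ [st.2]

-- ===== PORT B =====
-- B: span scanner over the suffix of `words`; a maximal non-newline run
-- `words[i:j]` is `w :: takeWhile (· ≠ "\n") ws`, the rest is the dropWhile.
def build_line_index_alt_go : List String → List (List String)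
  | [] => []
  | w :: ws =>
    if w == "\n" then build_line_index_alt_go ws
    else
      (w :: ws.takeWhile (fun x => !(x == "\n"))) ::
        build_line_index_alt_go (ws.dropWhile (fun x => !(x == "\n")))
  termination_by l => l.length
  decreasing_by
    · simp
    · exact Nat.lt_succ_of_le (ws.length_dropWhile_le _)

def build_line_index_py_alt (words : List String) : List (List String) :=
  build_line_index_alt_go words

-- ===== PRECONDITION & SPEC =====
def Spec_build_line_index_py (words : List String) (out : List (List String)) : Prop := out = build_line_index_py_alt words
instance (words : List String) (out : List (List String)) : Decidable (Spec_build_line_index_py words out) := by unfold Spec_build_line_index_py; infer_instance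

-- ===== CLAIM (what is proved, stated in full; the proofs are below) =====
def Claim_equal_build_line_index_py : Prop := ∀ (words : List String), Dom_build_line_index_py words → Spec_build_line_index_py words (build_line_index_py words)

-- ===== LEMMAS AND PROOFS =====

-- A's loop, recast as structural recursion on the remaining input with pending line c.
def bliARec (c : List String) : List String → List (List String)
  | [] => if c.isEmpty then [] else [c]
  | w :: ws =>
    if w == "\n" then
      if c.isEmpty then bliARec [] ws else c :: bliARec [] ws
    else bliARec (c ++ [w]) ws

-- The foldl-with-final-flush of A equals `lines ++ bliARec c rest`.
theorem bliA_foldl (ws : List String) : ∀ (lines : List (List String)) (c : List String),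
    (let st := ws.foldl
      (fun (st : List (List String) × List String) w =>
        if w == "\n" then
          (if st.2.isEmpty then st.1 else st.1 ++ [st.2], [])
        else
          (st.1, st.2 ++ [w]))
      (lines, c)
     if st.2.isEmpty then st.1 else st.1 ++ [st.2]) = lines ++ bliARec c ws := by
  induction ws with
  | nil =>
    intro lines c
    simp only [List.foldl, bliARec]
    by_cases h : c.isEmpty <;> simp [h]
  | cons w ws ih =>
    intro lines c
    simp only [List.foldl, bliARec]
    by_cases hw : w == "\n" <;> by_cases hc : c.isEmpty <;>
      simp only [hw, hc] <;> rw [ih] <;> simp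

-- bliARec with pending line c, characterised through B's span scanner.
theorem bliARec_eq_go (ws : List String) : ∀ (c : List String),
    bliARec c ws =
      if c.isEmpty then build_line_index_alt_go ws
      else (c ++ ws.takeWhile (fun x => !(x == "\n"))) ::
             build_line_index_alt_go (ws.dropWhile (fun x => !(x == "\n"))) := by
  induction ws with
  | nil =>
    intro c
    by_cases hc : c.isEmpty <;> simp [bliARec, build_line_index_alt_go, hc]
  | cons w ws ih =>
    intro c
    by_cases hw : w == "\n"
    · by_cases hc : c.isEmpty
      · simp [bliARec, hc, ih, build_line_index_alt_go,
          show w = "\n" from by simpa using hw]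
      · simp [bliARec, hc, ih, build_line_index_alt_go,
          show w = "\n" from by simpa using hw]
    · have hdrop : (w :: ws).dropWhile (fun x => !(x == "\n")) =
          ws.dropWhile (fun x => !(x == "\n")) := by
        simp [List.dropWhile, hw]
      have htake : (w :: ws).takeWhile (fun x => !(x == "\n")) =
          w :: ws.takeWhile (fun x => !(x == "\n")) := by
        simp [List.takeWhile, hw]
      by_cases hc : c.isEmpty
      · have hc' : c = [] := by simpa [List.isEmpty_iff] using hc
        simp [bliARec, hw, hc', ih, build_line_index_alt_go]
      · simp [bliARec, hw, hc, ih, htake, hdrop]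

-- ===== VERDICT (by name: the statement is the Claim_ definition above) =====
theorem build_line_index_py_spec : Claim_equal_build_line_index_py := by
  intro words _
  unfold Spec_build_line_index_py build_line_index_py build_line_index_py_alt
  rw [bliA_foldl words [] []]
  rw [bliARec_eq_go]
  simp
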